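-- pv_equiv track=rewrite | github.com/orenvlad-ai/wb-core | packages/application/sheet_vitrina_v1_feedbacks.py | _normalize_stars
-- ===== SOURCE A (Python) =====
-- DEFAULT_STARS = (1, 2, 3, 4, 5)
--
-- def _normalize_stars(stars: list[int] | None) -> list[int]:
--     if not stars:
--         return list(DEFAULT_STARS)
--     normalized = sorted({int(value) for value in stars})
--     invalid = [value for value in normalized if value < 1 or value > 5]
--     if invalid:
--         raise ValueError("stars must contain values from 1 to 5")
--     return normalized
-- ===== SOURCE B (Python) =====
-- DEFAULT_STARS = (1, 2, 3, 4, 5)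
--
-- def _normalize_stars(stars):
--     if not stars:
--         return list(DEFAULT_STARS)
--     mask = 0
--     for value in stars:
--         v = int(value)
--         if v < 1 or v > 5:
--             raise ValueError("stars must contain values from 1 to 5")
--         mask |= 1 << (v - 1)
--     return [v for v in DEFAULT_STARS if mask >> (v - 1) & 1]
-- ===== Notes on version B (the rewrite author's own statement) =====
-- stated objective: alternative
-- what changed: Replaces build-a-set, sort and post-filter by a single fold over the input accumulating a 5-bit presence bitmask (validating each value on the fly), then emitting the set bits in the fixed 1..5 order; no set and no sort.
import Mathlib
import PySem

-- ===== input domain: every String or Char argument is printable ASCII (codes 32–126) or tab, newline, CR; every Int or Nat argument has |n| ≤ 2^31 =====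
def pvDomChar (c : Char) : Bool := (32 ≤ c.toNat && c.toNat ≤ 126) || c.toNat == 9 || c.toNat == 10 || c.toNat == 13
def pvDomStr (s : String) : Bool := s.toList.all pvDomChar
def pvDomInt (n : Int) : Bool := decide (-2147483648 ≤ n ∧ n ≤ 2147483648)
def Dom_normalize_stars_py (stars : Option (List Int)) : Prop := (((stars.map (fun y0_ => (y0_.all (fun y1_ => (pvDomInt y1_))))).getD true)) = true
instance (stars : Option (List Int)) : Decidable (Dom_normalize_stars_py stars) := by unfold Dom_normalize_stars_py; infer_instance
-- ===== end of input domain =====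

-- B replaces set+sort+post-filter by one validating fold that accumulates a 5-bit presence
-- bitmask, then emits the set bits in the fixed 1..5 order (objective: alternative algorithm).
-- Inputs containing a value outside 1..5 make both Pythons raise ValueError; they are outside Pre_.

-- ===== PORT A =====
def normalize_stars_py (stars : Option (List Int)) : List Int :=
  match stars with
  | none => [1, 2, 3, 4, 5]          -- `if not stars: return list(DEFAULT_STARS)`
  | some l =>
    if l = [] then [1, 2, 3, 4, 5]
    else
      let normalized := PySem.List.sorted (PySem.Set.ofList l) (fun x => x) false
      let invalid := normalized.filter (fun v => decide (v < 1 ∨ 5 < v))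
      if invalid ≠ [] then []        -- raise ValueError: excluded by Pre_
      else normalized

-- ===== PORT B =====
-- the validating `for value in stars` loop of Source B; the mask only ever holds bits 0..4, so it
-- is kept as a Nat; `none` = the loop raised ValueError (excluded by Pre_)
def pvMaskLoop (l : List Int) (mask : Nat) : Option Nat :=
  match l with
  | [] => some mask
  | v :: rest =>
    if v < 1 ∨ 5 < v then none
    else pvMaskLoop rest (mask ||| (1 <<< (v - 1).toNat))

def normalize_stars_py_alt (stars : Option (List Int)) : List Int :=
  match stars with
  | none => [1, 2, 3, 4, 5]
  | some l =>
    if l = [] then [1, 2, 3, 4, 5]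
    else
      match pvMaskLoop l 0 with
      | none => []                   -- raise ValueError: excluded by Pre_
      | some m => [1, 2, 3, 4, 5].filter (fun v => (m >>> (v - 1).toNat) &&& 1 == 1)

-- ===== PRECONDITION & SPEC =====
-- Pre_ excludes exactly the inputs on which A (and B) raise ValueError: a nonempty list
-- containing a value outside 1..5.
def Pre_normalize_stars_py (stars : Option (List Int)) : Prop :=
  ∀ v ∈ stars.getD [], 1 ≤ v ∧ v ≤ 5
instance (stars : Option (List Int)) : Decidable (Pre_normalize_stars_py stars) := by unfold Pre_normalize_stars_py; infer_instance
def pvWitness_normalize_stars_py : Option (List Int) := some [3, 1, 3, 5]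

def Spec_normalize_stars_py (stars : Option (List Int)) (out : List Int) : Prop := out = normalize_stars_py_alt stars
instance (stars : Option (List Int)) (out : List Int) : Decidable (Spec_normalize_stars_py stars out) := by unfold Spec_normalize_stars_py; infer_instance

-- ===== CLAIM (what is proved, stated in full; the proofs are below) =====
def Claim_equal_normalize_stars_py : Prop := ∀ (stars : Option (List Int)), Dom_normalize_stars_py stars → Pre_normalize_stars_py stars → Spec_normalize_stars_py stars (normalize_stars_py stars)

-- ===== LEMMAS AND PROOFS =====

-- Under the precondition the mask loop returns, and bit k of the result records
-- whether k+1 occurs in the remaining list (or was already set in the accumulator).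
lemma pvMaskLoop_spec (l : List Int) (mask : Nat)
    (h : ∀ v ∈ l, 1 ≤ v ∧ v ≤ 5) :
    ∃ m, pvMaskLoop l mask = some m ∧
      ∀ k : Nat, m.testBit k = (mask.testBit k || decide ((k : Int) + 1 ∈ l)) := by
  induction l generalizing mask with
  | nil => exact ⟨mask, rfl, by simp⟩
  | cons v rest ih =>
    have hv := h v (List.mem_cons_self ..)
    have hrest : ∀ w ∈ rest, 1 ≤ w ∧ w ≤ 5 := fun w hw => h w (List.mem_cons_of_mem _ hw)
    obtain ⟨m, hm, hbit⟩ := ih (mask ||| (1 <<< (v - 1).toNat)) hrest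
    refine ⟨m, ?_, ?_⟩
    · rw [pvMaskLoop, if_neg (by omega)]; exact hm
    · intro k
      rw [hbit k]
      have h1 : (1 <<< (v - 1).toNat) = 2 ^ (v - 1).toNat := by
        simp [Nat.shiftLeft_eq]
      have heq : ((v - 1).toNat = k) ↔ (v = (k : Int) + 1) := by omega
      have hdec : decide ((v - 1).toNat = k) = decide ((k : Int) + 1 = v) := by
        simp only [decide_eq_decide]; omega
      simp only [Nat.testBit_or, h1, Nat.testBit_two_pow, List.mem_cons, hdec, Bool.or_assoc]
      by_cases h1 : (k : Int) + 1 = v <;> by_cases h2 : (k : Int) + 1 ∈ rest <;> simp [h1, h2]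

-- Under the precondition, sorted(set(l)) is the sublist of [1,2,3,4,5] of present members.
lemma sorted_ofList_eq_filter_default (l : List Int)
    (h : ∀ v ∈ l, 1 ≤ v ∧ v ≤ 5) :
    PySem.List.sorted (PySem.Set.ofList l) (fun x => x) false
      = [1, 2, 3, 4, 5].filter (fun v => PySem.Set.contains (PySem.Set.ofList l) v) := by
  apply PySem.List.sorted_eq_of_perm_of_pairwise_lt
  · apply (List.perm_ext_iff_of_nodup ?_ ?_).2
    · intro a
      simp only [List.mem_filter, PySem.Set.contains_iff, PySem.Set.mem_ofList]
      constructor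
      · rintro ⟨hmem, hc⟩; exact hc
      · intro ha
        refine ⟨?_, ha⟩
        have := h a ha
        simp only [List.mem_cons]
        omega
    · exact List.Nodup.filter _ (by decide)
    · exact PySem.Set.nodup_ofList l
  · exact List.Pairwise.filter _ (by decide)

-- ===== VERDICT (by name: the statement is the Claim_ definition above) =====
theorem normalize_stars_py_spec : Claim_equal_normalize_stars_py := by
  intro stars _ hpre
  unfold Spec_normalize_stars_py normalize_stars_py normalize_stars_py_alt
  match stars with
  | none => rfl
  | some l =>
    by_cases hl : l = []
    · simp [hl]
    · simp only [if_neg hl]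
      have hall : ∀ v ∈ l, 1 ≤ v ∧ v ≤ 5 := hpre
      have hset : ∀ v ∈ PySem.Set.ofList l, 1 ≤ v ∧ v ≤ 5 := by
        intro v hv; exact hall v ((PySem.Set.mem_ofList l v).1 hv)
      have hfilt : (PySem.List.sorted (PySem.Set.ofList l) (fun x => x) false).filter
          (fun v => decide (v < 1 ∨ 5 < v)) = [] := by
        rw [List.filter_eq_nil_iff]
        intro v hv
        have := hset v ((PySem.List.mem_sorted _ _ _ _).1 hv)
        simp; omega
      obtain ⟨m, hm, hbit⟩ := pvMaskLoop_spec l 0 hall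
      simp only [hfilt, hm, ne_eq, not_true_eq_false, if_false]
      rw [sorted_ofList_eq_filter_default l hall]
      apply List.filter_congr
      intro v hv
      have hv15 : 1 ≤ v ∧ v ≤ 5 := by
        simp only [List.mem_cons, List.not_mem_nil, or_false] at hv
        rcases hv with h|h|h|h|h <;> simp [h]
      have hk : ((v - 1).toNat : Int) + 1 = v := by omega
      have hb := hbit (v - 1).toNat
      rw [Nat.zero_testBit, Bool.false_or, hk] at hb
      rw [Bool.beq_eq_decide_eq,
        show (m >>> (v - 1).toNat) &&& 1 = m / 2 ^ (v - 1).toNat % 2 by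
          rw [Nat.and_one_is_mod, Nat.shiftRight_eq_div_pow],
        ← Nat.testBit_eq_decide_div_mod_eq, hb]
      by_cases hvl : v ∈ l <;>
        simp [hvl, PySem.Set.mem_ofList]
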